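-- pv_equiv track=rewrite | github.com/Zeitungsleser/BriocheGenerator | main.py | sum_line
-- ===== SOURCE A (Python) =====
-- def sum_line(line):
--     sum = 0
--     for i in line:
--         match i:
--             case 'v':
--                 sum += 1
--             case 'w':
--                 sum += 2
--             case 'l':
--                 sum -= 1
--             case 'r':
--                 sum -= 1
--             case 's':
--                 sum -= 2
--     return sum
-- ===== SOURCE B (Python) =====
-- WEIGHTS = {'v': 1, 'w': 2, 'l': -1, 'r': -1, 's': -2}
--
-- def sum_line(line):
--     if len(line) == 0:
--         return 0
--     if len(line) == 1:
--         return WEIGHTS.get(line[0], 0)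
--     mid = len(line) // 2
--     return sum_line(line[:mid]) + sum_line(line[mid:])
-- ===== Notes on version B (the rewrite author's own statement) =====
-- stated objective: alternative
-- what changed: Replaced the iterative per-character match/accumulate loop with a divide-and-conquer recursion that splits the string in half and adds the two halves' sums, with the per-character weights moved from control flow into a weight dictionary.
import Mathlib
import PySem

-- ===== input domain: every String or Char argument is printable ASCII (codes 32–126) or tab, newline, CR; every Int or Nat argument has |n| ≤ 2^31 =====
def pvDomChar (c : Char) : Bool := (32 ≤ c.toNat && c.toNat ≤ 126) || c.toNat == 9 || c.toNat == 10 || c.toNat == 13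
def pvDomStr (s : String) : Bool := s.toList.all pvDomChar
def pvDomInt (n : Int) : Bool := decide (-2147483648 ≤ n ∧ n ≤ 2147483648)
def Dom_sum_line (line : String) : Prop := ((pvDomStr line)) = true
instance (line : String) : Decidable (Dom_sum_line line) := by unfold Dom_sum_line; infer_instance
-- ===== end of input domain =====

-- B replaces A's iterative per-character match/accumulate loop by a divide-and-conquer
-- recursion over string halves with the weights in a dictionary (alternative, same result).

-- ===== PORT A =====
def sum_line (line : String) : Int :=
  line.toList.foldl
    (fun sum i =>
      match i with
      | 'v' => sum + 1
      | 'w' => sum + 2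
      | 'l' => sum - 1
      | 'r' => sum - 1
      | 's' => sum - 2
      | _ => sum)
    0

-- ===== PORT B =====
-- WEIGHTS = {'v': 1, 'w': 2, 'l': -1, 'r': -1, 's': -2}
def pvWeights : PySem.Dict Char Int :=
  PySem.Dict.ofList [('v', 1), ('w', 2), ('l', -1), ('r', -1), ('s', -2)]

-- the recursion of Source B, on the string's character list (line[:mid] / line[mid:] are slices)
def pvSumGo : List Char → Int
  | [] => 0
  | [c] => pvWeights.getD c 0
  | a :: b :: t =>
    -- mid = len(line) // 2 (positive operands, so Python's // is Nat division here)
    pvSumGo (PySem.List.slice (a :: b :: t) none (some (((a :: b :: t).length / 2 : Nat) : Int)))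
      + pvSumGo (PySem.List.slice (a :: b :: t) (some (((a :: b :: t).length / 2 : Nat) : Int)) none)
termination_by l => l.length
decreasing_by
  · rw [PySem.List.slice_to_natCast]
    simp only [List.length_take, List.length_cons]
    omega
  · rw [PySem.List.slice_from_natCast]
    simp only [List.length_drop, List.length_cons]
    omega

def sum_line_alt (line : String) : Int := pvSumGo line.toList

-- ===== PRECONDITION & SPEC =====
def Spec_sum_line (line : String) (out : Int) : Prop := out = sum_line_alt line
instance (line : String) (out : Int) : Decidable (Spec_sum_line line out) := by unfold Spec_sum_line; infer_instance

-- ===== CLAIM (what is proved, stated in full; the proofs are below) =====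
def Claim_equal_sum_line : Prop := ∀ (line : String), Dom_sum_line line → Spec_sum_line line (sum_line line)

-- ===== LEMMAS AND PROOFS =====

-- the per-character weight both programs realise
def pvW (c : Char) : Int := pvWeights.getD c 0

theorem pvSumGo_eq_sum (l : List Char) : pvSumGo l = (l.map pvW).sum := by
  induction l using pvSumGo.induct with
  | case1 => simp [pvSumGo]
  | case2 c => simp [pvSumGo, pvW]
  | case3 a b t ih1 ih2 =>
    rw [pvSumGo, ih1, ih2]
    simp only [PySem.List.slice_to_natCast, PySem.List.slice_from_natCast]
    rw [← List.sum_append, ← List.map_append, List.take_append_drop]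

theorem pvStep_eq (s : Int) (c : Char) :
    (match c with
      | 'v' => s + 1
      | 'w' => s + 2
      | 'l' => s - 1
      | 'r' => s - 1
      | 's' => s - 2
      | _ => s) = s + pvW c := by
  by_cases hv : c = 'v'
  · subst hv; rw [pvW, show pvWeights.getD 'v' 0 = 1 from by decide]; rfl
  by_cases hw : c = 'w'
  · subst hw; rw [pvW, show pvWeights.getD 'w' 0 = 2 from by decide]; rfl
  by_cases hl : c = 'l'
  · subst hl; rw [pvW, show pvWeights.getD 'l' 0 = -1 from by decide]; show s - 1 = s + -1; ring
  by_cases hr : c = 'r'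
  · subst hr; rw [pvW, show pvWeights.getD 'r' 0 = -1 from by decide]; show s - 1 = s + -1; ring
  by_cases hs : c = 's'
  · subst hs; rw [pvW, show pvWeights.getD 's' 0 = -2 from by decide]; show s - 2 = s + -2; ring
  have hmk : pvWeights = PySem.Dict.mk [('v', 1), ('w', 2), ('l', -1), ('r', -1), ('s', -2)] := by
    decide
  have hw0 : pvW c = 0 := by
    simp [pvW, hmk, PySem.Dict.getD_eq_get?_getD, PySem.Dict.get?_mk_cons,
      Ne.symm hv, Ne.symm hw, Ne.symm hl, Ne.symm hr, Ne.symm hs, PySem.Dict.get?]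
  rw [hw0]
  split <;> simp_all

theorem pvFoldl_eq (l : List Char) (s : Int) :
    l.foldl
      (fun sum i =>
        match i with
        | 'v' => sum + 1
        | 'w' => sum + 2
        | 'l' => sum - 1
        | 'r' => sum - 1
        | 's' => sum - 2
        | _ => sum) s = s + (l.map pvW).sum := by
  induction l generalizing s with
  | nil => simp
  | cons c t ih =>
    rw [List.foldl_cons, pvStep_eq, ih]
    simp [List.map_cons, List.sum_cons]
    ring

-- ===== VERDICT (by name: the statement is the Claim_ definition above) =====
theorem sum_line_spec : Claim_equal_sum_line := by
  intro line _
  unfold Spec_sum_line sum_line sum_line_alt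
  rw [pvFoldl_eq, pvSumGo_eq_sum]
  ring
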